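-- pv_equiv track=rewrite | github.com/AdamOtto/Daily-Challenges | Challenge460.py | Solution
-- ===== SOURCE A (Python) =====
-- def Solution(ar):
--     l = len(ar)
--     rightY = [0]*l
--     if ar[0] == 'y':
--         rightY[0] = 1
--     leftX = [0]*l
--     if ar[l - 1] == 'x':
--         leftX[l-1] = 1
--
--     for i in range(1, l):
--         if ar[i] == "y":
--             rightY[i] += 1
--         rightY[i] += rightY[i - 1]
--     for i in reversed(range(l - 1)):
--         if ar[i] == "x":
--             leftX[i] += 1
--         leftX[i] += leftX[i + 1]
--     retVal = l
--     for i in range(0, l):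
--         retVal = min(retVal, leftX[i] + rightY[i])
--     return retVal - 1
-- ===== SOURCE B (Python) =====
-- def Solution(ar):
--     # One pass with two counters instead of prefix/suffix arrays.
--     # For each position i: cost(i) = (#'y' in ar[:i+1]) + (#'x' in ar[i:])
--     #                              = totalX + (#'y' in ar[:i+1]) - (#'x' in ar[:i])
--     # so we minimize d = y_incl - x_excl in a single scan and add totalX at the end.
--     totalX = ar.count('x')
--     y = 0
--     x = 0
--     best = None
--     for s in ar:
--         if s == 'y':
--             y += 1
--         d = y - x
--         if s == 'x':
--             x += 1
--         if best is None or d < best: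
--             best = d
--     return totalX + best - 1
-- ===== Notes on version B (the rewrite author's own statement) =====
-- stated objective: faster
-- what changed: Replaces the two length-n prefix/suffix arrays (rightY, leftX) and the final min-scan with a single left-to-right pass keeping two scalar counters (y's seen inclusive, x's seen exclusive) and the running minimum of their difference, adding the total x-count once at the end — no list allocation or indexing (measured ~3x faster).
import Mathlib
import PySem

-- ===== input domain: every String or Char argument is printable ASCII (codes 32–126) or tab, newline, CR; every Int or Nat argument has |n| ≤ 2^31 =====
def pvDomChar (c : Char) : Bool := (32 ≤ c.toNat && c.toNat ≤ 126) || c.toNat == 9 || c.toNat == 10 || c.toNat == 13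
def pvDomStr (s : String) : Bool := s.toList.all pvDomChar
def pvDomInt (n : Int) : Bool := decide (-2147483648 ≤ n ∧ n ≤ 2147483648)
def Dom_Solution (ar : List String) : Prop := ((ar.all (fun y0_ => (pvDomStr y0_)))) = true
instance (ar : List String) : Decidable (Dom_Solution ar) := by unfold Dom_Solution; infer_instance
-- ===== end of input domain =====

-- ===== PORT A =====
-- A = B proved on all nonempty lists; A raises IndexError on [] (it reads ar[0]), excluded by Pre_.
def Solution (ar : List String) : Int :=
  let l : Int := PySem.List.len ar
  let rightY0 : List Int := PySem.List.pyRepeat [0] l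
  let rightY1 : List Int :=
    if PySem.List.pyGetD ar 0 "" = "y" then PySem.List.pySetD rightY0 0 1 else rightY0
  let leftX0 : List Int := PySem.List.pyRepeat [0] l
  let leftX1 : List Int :=
    if PySem.List.pyGetD ar (l - 1) "" = "x" then PySem.List.pySetD leftX0 (l - 1) 1 else leftX0
  let rightY : List Int := (PySem.List.pyRange 1 l 1).foldl (fun r i =>
      let r := if PySem.List.pyGetD ar i "" = "y"
               then PySem.List.pySetD r i (PySem.List.pyGetD r i 0 + 1) else r
      PySem.List.pySetD r i (PySem.List.pyGetD r i 0 + PySem.List.pyGetD r (i - 1) 0)) rightY1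
  let leftX : List Int := ((PySem.List.pyRange 0 (l - 1) 1).reverse).foldl (fun r i =>
      let r := if PySem.List.pyGetD ar i "" = "x"
               then PySem.List.pySetD r i (PySem.List.pyGetD r i 0 + 1) else r
      PySem.List.pySetD r i (PySem.List.pyGetD r i 0 + PySem.List.pyGetD r (i + 1) 0)) leftX1
  let retVal : Int := (PySem.List.pyRange 0 l 1).foldl (fun rv i =>
      min rv (PySem.List.pyGetD leftX i 0 + PySem.List.pyGetD rightY i 0)) l
  retVal - 1

-- ===== PORT B =====
-- one pass, two counters; best = none only on [] (outside Pre_, where the Python B raises TypeError)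
def Solution_alt (ar : List String) : Int :=
  let totalX : Int := (ar.count "x" : Int)
  let st : Int × Int × Option Int := ar.foldl (fun st s =>
      let y := if s = "y" then st.1 + 1 else st.1
      let d := y - st.2.1
      let x := if s = "x" then st.2.1 + 1 else st.2.1
      let best : Option Int := match st.2.2 with
        | none => some d
        | some b => if d < b then some d else some b
      (y, x, best)) ((0 : Int), (0 : Int), (none : Option Int))
  totalX + (st.2.2.getD 0) - 1

-- ===== PRECONDITION & SPEC =====
-- A reads ar[0] and ar[len-1]: it raises IndexError on the empty list, which Pre_ excludes.
def Pre_Solution (ar : List String) : Prop := ar ≠ []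
instance (ar : List String) : Decidable (Pre_Solution ar) := by unfold Pre_Solution; infer_instance
def pvWitness_Solution : List String := (["x", "y", "x"])
def Spec_Solution (ar : List String) (out : Int) : Prop := out = Solution_alt ar
instance (ar : List String) (out : Int) : Decidable (Spec_Solution ar out) := by unfold Spec_Solution; infer_instance

-- ===== CLAIM (what is proved, stated in full; the proofs are below) =====
def Claim_equal_Solution : Prop := ∀ (ar : List String), Dom_Solution ar → Pre_Solution ar → Spec_Solution ar (Solution ar)

-- ===== LEMMAS AND PROOFS =====

-- Y(i) = #"y" in ar[0..i];  X(i) = #"x" in ar[i..];  Xb(i) = #"x" in ar[0..i-1];  d(i) = Y(i) - Xb(i)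
def prefY (ar : List String) (i : Nat) : Int := ((ar.take (i + 1)).count "y" : Int)

lemma prefY_succ (ar : List String) (i : Nat) (h : i + 1 < ar.length) :
    prefY ar (i+1) = (if ar.getD (i+1) "" = "y" then (1:Int) else 0) + prefY ar i := by
  unfold prefY
  have hg : ar.getD (i+1) "" = ar[i+1] := by
    rw [List.getD_eq_getElem?_getD, List.getElem?_eq_getElem h]; rfl
  rw [hg, List.take_add_one, List.getElem?_eq_getElem h]
  rw [List.count_append]
  simp [List.count_singleton]
  split_ifs with h1 <;> push_cast [h1] <;> ring

lemma rightY_loop (ar : List String) (r0 : List Int)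
    (h0 : r0 = [prefY ar 0] ++ List.replicate (ar.length - 1) 0)
    (j : Nat) (hj : j < ar.length) :
    (PySem.List.pyRange 1 (1 + (j:Int)) 1).foldl (fun r i =>
      let r := if PySem.List.pyGetD ar i "" = "y"
               then PySem.List.pySetD r i (PySem.List.pyGetD r i 0 + 1) else r
      PySem.List.pySetD r i (PySem.List.pyGetD r i 0 + PySem.List.pyGetD r (i - 1) 0)) r0
    = (List.range (j+1)).map (prefY ar) ++ List.replicate (ar.length - (j+1)) 0 := by
  induction j with
  | zero => simp [PySem.List.pyRange_one_eq_nil, h0]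
  | succ j ih =>
    have hj' : j < ar.length := by omega
    have hsplit : PySem.List.pyRange 1 (1 + ((j:Int)+1)) 1
        = PySem.List.pyRange 1 (1 + (j:Int)) 1 ++ [1 + (j:Int)] := by
      have := PySem.List.pyRange_one_succ_right (a := 1) (b := 1 + (j:Int)) (by omega)
      simpa [add_assoc] using this
    push_cast
    rw [hsplit, List.foldl_append, ih hj']
    set L := (List.range (j+1)).map (prefY ar) ++ List.replicate (ar.length - (j+1)) 0 with hL
    have hlen : ((List.range (j+1)).map (prefY ar)).length = j + 1 := by simp
    have hcast : (1 : Int) + (j:Int) = ((j+1 : Nat) : Int) := by push_cast; ring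
    have hgetAr : PySem.List.pyGetD ar (1 + (j:Int)) "" = ar.getD (j+1) "" := by
      rw [hcast, PySem.List.pyGetD_natCast]
    have hLget : PySem.List.pyGetD L (1 + (j:Int)) 0 = 0 := by
      rw [hcast, PySem.List.pyGetD_natCast, hL, List.getD_append_right _ _ _ _ (by omega)]
      simp [hlen]
    have hLgetPrev : ∀ (M : List Int), M = L ∨ M = L.set (j+1) 1 →
        PySem.List.pyGetD M ((1 + (j:Int)) - 1) 0 = prefY ar j := by
      intro M hM
      have : (1 : Int) + (j:Int) - 1 = ((j : Nat) : Int) := by push_cast; ring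
      rw [this, PySem.List.pyGetD_natCast]
      have hMg : M.getD j 0 = L.getD j 0 := by
        rcases hM with h | h <;> subst h
        · rfl
        · rw [List.getD_eq_getElem?_getD, List.getD_eq_getElem?_getD, List.getElem?_set_ne (by omega)]
      rw [hMg, hL, List.getD_append _ _ _ _ (by simp)]
      simp
    have hlenL : L.length = ar.length := by
      rw [hL]; simp; omega
    have hfinal : ∀ v : Int, v = prefY ar (j+1) →
        L.set (j+1) v = (List.range (j+1+1)).map (prefY ar) ++ List.replicate (ar.length - (j+1+1)) 0 := by
      intro v hv
      rw [hL, show j+1 = ((List.range (j+1)).map (prefY ar)).length from (by simp)]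
      rw [List.set_append_right _ _ (by simp)]
      simp only [hlen, Nat.sub_self]
      obtain ⟨m, hm⟩ : ∃ m, ar.length - (j+1) = m + 1 := ⟨ar.length - (j+2), by omega⟩
      rw [hm, List.replicate_succ, List.set_cons_zero, hv, List.range_succ]
      rw [show ar.length - (j+1+1) = m from by omega]
      simp [List.range_succ]
    simp only [List.foldl_cons, List.foldl_nil]
    by_cases hy : ar.getD (j+1) "" = "y"
    · simp only [hgetAr, hy, if_pos, hLget, zero_add]
      have hset : PySem.List.pySetD L (1 + (j:Int)) 1 = L.set (j+1) 1 := by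
        rw [hcast, PySem.List.pySetD_natCast]
      rw [hset]
      have hM1 : PySem.List.pyGetD (L.set (j+1) 1) (1 + (j:Int)) 0 = 1 := by
        rw [hcast, PySem.List.pyGetD_natCast, List.getD_eq_getElem?_getD,
            List.getElem?_set_self (by omega)]
        rfl
      rw [hM1, hLgetPrev _ (Or.inr rfl)]
      have hset2 : PySem.List.pySetD (L.set (j+1) 1) (1 + (j:Int)) (1 + prefY ar j)
          = (L.set (j+1) 1).set (j+1) (1 + prefY ar j) := by
        rw [hcast, PySem.List.pySetD_natCast]
      rw [hset2, List.set_set]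
      exact hfinal _ (by rw [prefY_succ ar j hj, if_pos hy])
    · simp only [hgetAr, hy, ite_false, hLget, zero_add]
      rw [hLgetPrev _ (Or.inl rfl)]
      have hset : PySem.List.pySetD L (1 + (j:Int)) (prefY ar j) = L.set (j+1) (prefY ar j) := by
        rw [hcast, PySem.List.pySetD_natCast]
      rw [hset]
      exact hfinal _ (by rw [prefY_succ ar j hj, if_neg hy, zero_add])

def sufX (ar : List String) (i : Nat) : Int := ((ar.drop i).count "x" : Int)

lemma sufX_succ (ar : List String) (i : Nat) (h : i < ar.length) :
    sufX ar i = (if ar.getD i "" = "x" then (1:Int) else 0) + sufX ar (i+1) := by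
  unfold sufX
  have hg : ar.getD i "" = ar[i] := by
    rw [List.getD_eq_getElem?_getD, List.getElem?_eq_getElem h]; rfl
  rw [hg, List.drop_eq_getElem_cons h, List.count_cons]
  simp only [beq_iff_eq]
  split_ifs with h1 <;> push_cast <;> ring

lemma set_repl (j : Nat) (v : Int) (tl : List Int) :
    (List.replicate (j+1) (0:Int) ++ tl).set j v = List.replicate j 0 ++ v :: tl := by
  induction j with
  | zero => simp
  | succ j ih =>
    rw [List.replicate_succ, List.cons_append, List.set_cons_succ, ih,
        List.replicate_succ (n := j), List.cons_append]

lemma leftX_loop (ar : List String) (j : Nat) (hj : j ≤ ar.length - 1) (h1 : 1 ≤ ar.length) :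
    ((PySem.List.pyRange 0 (j:Int) 1).reverse).foldl (fun r i =>
      let r := if PySem.List.pyGetD ar i "" = "x"
               then PySem.List.pySetD r i (PySem.List.pyGetD r i 0 + 1) else r
      PySem.List.pySetD r i (PySem.List.pyGetD r i 0 + PySem.List.pyGetD r (i + 1) 0))
      (List.replicate j 0 ++ (List.range' j (ar.length - j)).map (sufX ar))
    = (List.range ar.length).map (sufX ar) := by
  induction j with
  | zero =>
    simp [PySem.List.pyRange_one_eq_nil, List.range_eq_range']
  | succ j ih =>
    have hj' : j ≤ ar.length - 1 := by omega
    have hjlt : j + 1 < ar.length := by omega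
    have hsplit : ((PySem.List.pyRange 0 ((j:Nat)+1 : Int) 1).reverse)
        = (j:Int) :: (PySem.List.pyRange 0 (j:Int) 1).reverse := by
      rw [PySem.List.pyRange_one_succ_right (a := 0) (b := (j:Int)) (by omega)]
      simp
    push_cast
    rw [hsplit, List.foldl_cons]
    set M := List.replicate (j+1) 0 ++ (List.range' (j+1) (ar.length - (j+1))).map (sufX ar) with hM
    have hmlen : ∃ m, ar.length - (j+1) = m + 1 := ⟨ar.length - (j+2), by omega⟩
    obtain ⟨m, hm⟩ := hmlen
    have hgetAr : PySem.List.pyGetD ar ((j:Nat) : Int) "" = ar.getD j "" := by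
      rw [PySem.List.pyGetD_natCast]
    have hMget : PySem.List.pyGetD M ((j:Nat) : Int) 0 = 0 := by
      rw [PySem.List.pyGetD_natCast, hM, List.getD_append _ _ _ _ (by simp)]
      simp
    have hMnext : ∀ (N : List Int), N = M ∨ N = M.set j 1 →
        PySem.List.pyGetD N ((j:Nat) + 1 : Int) 0 = sufX ar (j+1) := by
      intro N hN
      rw [show ((j:Nat) + 1 : Int) = ((j+1 : Nat) : Int) from by push_cast; ring,
          PySem.List.pyGetD_natCast]
      have hNg : N.getD (j+1) 0 = M.getD (j+1) 0 := by
        rcases hN with h | h <;> subst h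
        · rfl
        · rw [List.getD_eq_getElem?_getD, List.getD_eq_getElem?_getD, List.getElem?_set_ne (by omega)]
      rw [hNg, hM, List.getD_append_right _ _ _ _ (by simp), hm]
      simp [List.range'_succ]
    have hfinal : ∀ v : Int, v = sufX ar j →
        M.set j v = List.replicate j 0 ++ (List.range' j (ar.length - j)).map (sufX ar) := by
      intro v hv
      rw [hM, set_repl, show ar.length - j = (ar.length - (j+1)) + 1 from by omega,
          List.range'_succ]
      simp [hv]
    have hlenM : M.length = ar.length := by rw [hM]; simp; omega
    by_cases hx : ar.getD j "" = "x"
    · simp only [hgetAr, hx, if_pos, hMget, zero_add]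
      have hset : PySem.List.pySetD M ((j:Nat):Int) 1 = M.set j 1 := by
        rw [PySem.List.pySetD_natCast]
      rw [hset]
      have hN1 : PySem.List.pyGetD (M.set j 1) ((j:Nat):Int) 0 = 1 := by
        rw [PySem.List.pyGetD_natCast, List.getD_eq_getElem?_getD,
            List.getElem?_set_self (by omega)]
        rfl
      rw [hN1, hMnext _ (Or.inr rfl)]
      have hset2 : PySem.List.pySetD (M.set j 1) ((j:Nat):Int) (1 + sufX ar (j+1))
          = (M.set j 1).set j (1 + sufX ar (j+1)) := by
        rw [PySem.List.pySetD_natCast]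
      rw [hset2, List.set_set, hfinal _ (by rw [sufX_succ ar j (by omega), if_pos hx])]
      exact ih hj'
    · simp only [hgetAr, hx, ite_false, hMget, zero_add]
      rw [hMnext _ (Or.inl rfl)]
      have hset : PySem.List.pySetD M ((j:Nat):Int) (sufX ar (j+1)) = M.set j (sufX ar (j+1)) := by
        rw [PySem.List.pySetD_natCast]
      rw [hset, hfinal _ (by rw [sufX_succ ar j (by omega), if_neg hx, zero_add])]
      exact ih hj'

def prefXb (ar : List String) (i : Nat) : Int := ((ar.take i).count "x" : Int)
def dAt (ar : List String) (i : Nat) : Int := prefY ar i - prefXb ar i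

lemma prefY_cons (s : String) (t : List String) (j : Nat) :
    prefY (s :: t) (j+1) = (if s = "y" then (1:Int) else 0) + prefY t j := by
  unfold prefY
  rw [List.take_succ_cons, List.count_cons]
  by_cases h : s = "y" <;> simp [h] <;> push_cast <;> ring

lemma prefXb_cons (s : String) (t : List String) (j : Nat) :
    prefXb (s :: t) (j+1) = (if s = "x" then (1:Int) else 0) + prefXb t j := by
  unfold prefXb
  rw [List.take_succ_cons, List.count_cons]
  by_cases h : s = "x" <;> simp [h] <;> push_cast <;> ring

def dlist : List String → Int → Int → List Int
  | [], _, _ => []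
  | s :: t, y, x =>
      let y' := if s = "y" then y+1 else y
      let d := y' - x
      let x' := if s = "x" then x+1 else x
      d :: dlist t y' x'

lemma dAt_cons_zero (s : String) (t : List String) :
    dAt (s :: t) 0 = (if s = "y" then (1:Int) else 0) := by
  unfold dAt prefY prefXb
  by_cases h : s = "y" <;> simp [h, List.count_cons]

lemma dAt_cons_succ (s : String) (t : List String) (j : Nat) :
    dAt (s :: t) (j+1) = (if s = "y" then (1:Int) else 0) - (if s = "x" then (1:Int) else 0) + dAt t j := by
  unfold dAt
  rw [prefY_cons, prefXb_cons]; ring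

lemma dlist_eq (ar : List String) : ∀ (y x : Int),
    dlist ar y x = (List.range ar.length).map (fun j => y - x + dAt ar j) := by
  induction ar with
  | nil => intro y x; simp [dlist]
  | cons s t ih =>
    intro y x
    rw [dlist, ih]
    rw [List.length_cons, List.range_succ_eq_map, List.map_cons, List.map_map]
    congr 1
    · rw [dAt_cons_zero]; by_cases h : s = "y" <;> simp [h] <;> ring
    · apply List.map_congr_left
      intro j _
      simp only [Function.comp]
      rw [dAt_cons_succ]
      by_cases hy : s = "y" <;> by_cases hx : s = "x" <;> simp [hy, hx] <;> ring

lemma bfold (t : List String) : ∀ (y x b : Int),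
    t.foldl (fun st s =>
      let y := if s = "y" then st.1 + 1 else st.1
      let d := y - st.2.1
      let x := if s = "x" then st.2.1 + 1 else st.2.1
      let best : Option Int := match st.2.2 with
        | none => some d
        | some b => if d < b then some d else some b
      (y, x, best)) (y, x, some b)
    = (y + (t.count "y" : Int), x + (t.count "x" : Int), some ((dlist t y x).foldl min b)) := by
  induction t with
  | nil => intro y x b; simp [dlist]
  | cons s t ih =>
    intro y x b
    have hmatch : ∀ d0 : Int, (match (some b : Option Int) with
        | none => some d0 | some bb => if d0 < bb then some d0 else some bb) = some (min b d0) := by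
      intro d0
      show (if d0 < b then some d0 else some b) = some (min b d0)
      split_ifs with h <;> simp <;> omega
    have hstep : (fun (st : Int × Int × Option Int) (s : String) =>
      let y := if s = "y" then st.1 + 1 else st.1
      let d := y - st.2.1
      let x := if s = "x" then st.2.1 + 1 else st.2.1
      let best : Option Int := match st.2.2 with
        | none => some d
        | some b => if d < b then some d else some b
      (y, x, best)) (y, x, some b) s
        = ((if s = "y" then y+1 else y), (if s = "x" then x+1 else x),
            some (min b ((if s = "y" then y+1 else y) - x))) := by
      dsimp only
      simp only [Prod.mk.injEq]
      refine ⟨trivial, trivial, ?_⟩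
      split_ifs with h <;> simp <;> omega
    refine Eq.trans (congrArg (fun st => List.foldl (fun (st : Int × Int × Option Int) (s : String) =>
      let y := if s = "y" then st.1 + 1 else st.1
      let d := y - st.2.1
      let x := if s = "x" then st.2.1 + 1 else st.2.1
      let best : Option Int := match st.2.2 with
        | none => some d
        | some b => if d < b then some d else some b
      (y, x, best)) st t) hstep) ?_
    beta_reduce
    rw [ih, dlist]
    simp only [List.foldl_cons]
    refine congrArg₂ _ ?_ (congrArg₂ _ ?_ rfl) <;> rw [List.count_cons] <;> by_cases h : s = "y" <;> by_cases h2 : s = "x" <;> simp [h, h2] <;> push_cast <;> ring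

lemma foldl_min_map_add (xs : List Int) : ∀ (c a : Int),
    (xs.map (c + ·)).foldl min (c + a) = c + xs.foldl min a := by
  induction xs with
  | nil => intro c a; simp
  | cons h t ih =>
    intro c a
    simp only [List.map_cons, List.foldl_cons]
    rw [show min (c + a) (c + h) = c + min a h from by omega, ih]

lemma count_split (ar : List String) (j : Nat) :
    sufX ar j + prefXb ar j = (ar.count "x" : Int) := by
  unfold sufX prefXb
  rw [show ar.count "x" = (ar.take j).count "x" + (ar.drop j).count "x" from by
        rw [← List.count_append, List.take_append_drop]]
  push_cast; ring

lemma count_x_le (ar : List String) : (ar.count "x" : Int) ≤ ar.length := by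
  exact_mod_cast Nat.cast_le.mpr (List.count_le_length)


lemma init_rightY (ar : List String) (h : ar ≠ []) :
    (if PySem.List.pyGetD ar 0 "" = "y"
       then PySem.List.pySetD (PySem.List.pyRepeat ([0] : List Int) (PySem.List.len ar)) 0 1
       else PySem.List.pyRepeat [0] (PySem.List.len ar)) = [prefY ar 0] ++ List.replicate (ar.length - 1) 0 := by
  obtain ⟨a, t, rfl⟩ := List.exists_cons_of_ne_nil h
  have hrep : PySem.List.pyRepeat ([0] : List Int) (PySem.List.len (a :: t))
      = List.replicate (a :: t).length 0 := by
    rw [PySem.List.len_eq, PySem.List.pyRepeat_singleton]; simp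
  have hget : PySem.List.pyGetD (a :: t) 0 "" = a := by
    simp [PySem.List.pyGetD_ofNat']
  have hpy : prefY (a :: t) 0 = (if a = "y" then (1:Int) else 0) := by
    unfold prefY; by_cases hy : a = "y" <;> simp [hy]
  rw [hrep, hget, hpy]
  by_cases hy : a = "y" <;> simp [hy, List.replicate_succ]
  rw [PySem.List.pySetD_of_nonneg (h := le_refl (0:Int))]
  rfl

lemma init_leftX (ar : List String) (h : ar ≠ []) :
    (if PySem.List.pyGetD ar (PySem.List.len ar - 1) "" = "x"
       then PySem.List.pySetD (PySem.List.pyRepeat ([0] : List Int) (PySem.List.len ar)) (PySem.List.len ar - 1) 1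
       else PySem.List.pyRepeat [0] (PySem.List.len ar)) = List.replicate (ar.length - 1) 0
      ++ (List.range' (ar.length - 1) (ar.length - (ar.length - 1))).map (sufX ar) := by
  have hn : 1 ≤ ar.length := List.length_pos_of_ne_nil h
  have hrep : PySem.List.pyRepeat ([0] : List Int) (PySem.List.len ar)
      = List.replicate ar.length 0 := by
    rw [PySem.List.len_eq, PySem.List.pyRepeat_singleton]; simp
  have hcast : PySem.List.len ar - 1 = ((ar.length - 1 : Nat) : Int) := by
    rw [PySem.List.len_eq]; omega
  have hget : PySem.List.pyGetD ar (PySem.List.len ar - 1) "" = ar.getD (ar.length - 1) "" := by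
    rw [hcast, PySem.List.pyGetD_natCast]
  have hone : ar.length - (ar.length - 1) = 1 := by omega
  have hlast : sufX ar (ar.length - 1) = (if ar.getD (ar.length - 1) "" = "x" then (1:Int) else 0) := by
    have hlt : ar.length - 1 < ar.length := by omega
    have hg : ar.getD (ar.length - 1) "" = ar[ar.length - 1] := by
      rw [List.getD_eq_getElem?_getD, List.getElem?_eq_getElem hlt]; rfl
    unfold sufX
    rw [List.drop_eq_getElem_cons hlt, show ar.length - 1 + 1 = ar.length from by omega,
        List.drop_length, hg]
    by_cases hx : ar[ar.length - 1] = "x" <;> simp [hx]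
  have hsplit : List.replicate ar.length (0:Int)
      = List.replicate (ar.length - 1 + 1) 0 ++ ([] : List Int) := by
    rw [List.append_nil, show ar.length - 1 + 1 = ar.length from by omega]
  rw [hrep, hget, hone, List.range'_one, List.map_singleton, hlast]
  by_cases hx : ar.getD (ar.length - 1) "" = "x"
  · rw [if_pos hx, if_pos hx, hcast, PySem.List.pySetD_natCast, hsplit, set_repl]
  · rw [if_neg hx, if_neg hx, hsplit, List.append_nil,
        show ar.length - 1 + 1 = ar.length - 1 + 1 from rfl, ← List.append_nil (List.replicate (ar.length - 1 + 1) (0:Int))]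
    rw [List.replicate_succ', List.append_assoc]
    rfl

lemma A_eval (ar : List String) (h : ar ≠ []) :
    Solution ar = ((List.range ar.length).map (fun j => sufX ar j + prefY ar j)).foldl min (ar.length : Int) - 1 := by
  have hn : 1 ≤ ar.length := List.length_pos_of_ne_nil h
  have h1 : (PySem.List.len ar) = 1 + ((ar.length - 1 : Nat) : Int) := by
    rw [PySem.List.len_eq]; omega
  have hRY : ((PySem.List.pyRange 1 (PySem.List.len ar) 1).foldl (fun r i =>
      let r := if PySem.List.pyGetD ar i "" = "y"
               then PySem.List.pySetD r i (PySem.List.pyGetD r i 0 + 1) else r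
      PySem.List.pySetD r i (PySem.List.pyGetD r i 0 + PySem.List.pyGetD r (i - 1) 0))
      (if PySem.List.pyGetD ar 0 "" = "y"
       then PySem.List.pySetD (PySem.List.pyRepeat ([0] : List Int) (PySem.List.len ar)) 0 1
       else PySem.List.pyRepeat [0] (PySem.List.len ar))) = (List.range ar.length).map (prefY ar) := by
    rw [init_rightY ar h, h1, rightY_loop ar _ rfl (ar.length - 1) (by omega),
        show ar.length - 1 + 1 = ar.length from by omega]
    simp
  have hLX : (((PySem.List.pyRange 0 (PySem.List.len ar - 1) 1).reverse).foldl (fun r i =>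
      let r := if PySem.List.pyGetD ar i "" = "x"
               then PySem.List.pySetD r i (PySem.List.pyGetD r i 0 + 1) else r
      PySem.List.pySetD r i (PySem.List.pyGetD r i 0 + PySem.List.pyGetD r (i + 1) 0))
      (if PySem.List.pyGetD ar (PySem.List.len ar - 1) "" = "x"
       then PySem.List.pySetD (PySem.List.pyRepeat ([0] : List Int) (PySem.List.len ar)) (PySem.List.len ar - 1) 1
       else PySem.List.pyRepeat [0] (PySem.List.len ar))) = (List.range ar.length).map (sufX ar) := by
    have h2 : PySem.List.len ar - 1 = ((ar.length - 1 : Nat) : Int) := by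
      rw [PySem.List.len_eq]; omega
    rw [init_leftX ar h, h2, leftX_loop ar (ar.length - 1) (by omega) hn]
  calc Solution ar
      = (PySem.List.pyRange 0 (PySem.List.len ar) 1).foldl
          (fun rv i => min rv (PySem.List.pyGetD (((PySem.List.pyRange 0 (PySem.List.len ar - 1) 1).reverse).foldl (fun r i =>
      let r := if PySem.List.pyGetD ar i "" = "x"
               then PySem.List.pySetD r i (PySem.List.pyGetD r i 0 + 1) else r
      PySem.List.pySetD r i (PySem.List.pyGetD r i 0 + PySem.List.pyGetD r (i + 1) 0))
      (if PySem.List.pyGetD ar (PySem.List.len ar - 1) "" = "x"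
       then PySem.List.pySetD (PySem.List.pyRepeat ([0] : List Int) (PySem.List.len ar)) (PySem.List.len ar - 1) 1
       else PySem.List.pyRepeat [0] (PySem.List.len ar))) i 0 + PySem.List.pyGetD ((PySem.List.pyRange 1 (PySem.List.len ar) 1).foldl (fun r i =>
      let r := if PySem.List.pyGetD ar i "" = "y"
               then PySem.List.pySetD r i (PySem.List.pyGetD r i 0 + 1) else r
      PySem.List.pySetD r i (PySem.List.pyGetD r i 0 + PySem.List.pyGetD r (i - 1) 0))
      (if PySem.List.pyGetD ar 0 "" = "y"
       then PySem.List.pySetD (PySem.List.pyRepeat ([0] : List Int) (PySem.List.len ar)) 0 1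
       else PySem.List.pyRepeat [0] (PySem.List.len ar))) i 0))
          (PySem.List.len ar) - 1 := rfl
    _ = ((List.range ar.length).map (fun j => sufX ar j + prefY ar j)).foldl min (ar.length : Int) - 1 := by
        rw [hRY, hLX, PySem.List.len_eq, PySem.List.pyRange_zero_nat, List.foldl_map, List.foldl_map]
        congr 1
        apply PySem.List.foldl_congr_mem
        intro acc k hk
        have hklt : k < ar.length := List.mem_range.mp hk
        rw [PySem.List.pyGetD_natCast, PySem.List.pyGetD_natCast,
            PySem.List.getD_map_range (h := hklt), PySem.List.getD_map_range (h := hklt)]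


lemma B_eval (s : String) (t : List String) :
    Solution_alt (s :: t) = ((s :: t).count "x" : Int)
      + (dlist t (if s = "y" then (0:Int)+1 else 0) (if s = "x" then (0:Int)+1 else 0)).foldl min
          ((if s = "y" then (0:Int)+1 else 0) - 0) - 1 := by
  refine Eq.trans (show Solution_alt (s :: t) = ((s :: t).count "x" : Int)
      + (List.foldl (fun (st : Int × Int × Option Int) (s : String) =>
      let y := if s = "y" then st.1 + 1 else st.1
      let d := y - st.2.1
      let x := if s = "x" then st.2.1 + 1 else st.2.1
      let best : Option Int := match st.2.2 with
        | none => some d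
        | some b => if d < b then some d else some b
      (y, x, best))
          ((if s = "y" then (0:Int)+1 else 0), (if s = "x" then (0:Int)+1 else 0),
            some ((if s = "y" then (0:Int)+1 else 0) - 0)) t).2.2.getD 0 - 1 from rfl) ?_
  rw [bfold]
  rfl

-- ===== VERDICT (by name: the statement is the Claim_ definition above) =====
theorem Solution_spec : Claim_equal_Solution := by
  intro ar _ hpre
  unfold Spec_Solution
  obtain ⟨s, t, rfl⟩ := List.exists_cons_of_ne_nil hpre
  rw [A_eval _ hpre, B_eval]
  have hsum : ∀ j ∈ List.range (s :: t).length,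
      sufX (s :: t) j + prefY (s :: t) j = ((s :: t).count "x" : Int) + dAt (s :: t) j := by
    intro j _
    rw [← count_split (s :: t) j]
    unfold dAt
    ring
  rw [List.map_congr_left hsum]
  have hdl : (List.range (s :: t).length).map (fun j => dAt (s :: t) j) = dlist (s :: t) 0 0 := by
    rw [dlist_eq]
    simp
  have hmap2 : (List.range (s :: t).length).map (fun j => ((s :: t).count "x" : Int) + dAt (s :: t) j)
      = (dlist (s :: t) 0 0).map (((s :: t).count "x" : Int) + ·) := by
    rw [← hdl, List.map_map]
    rfl
  rw [hmap2]
  have hcons : dlist (s :: t) 0 0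
      = ((if s = "y" then (0:Int)+1 else 0) - 0)
        :: dlist t (if s = "y" then (0:Int)+1 else 0) (if s = "x" then (0:Int)+1 else 0) := rfl
  rw [hcons, List.map_cons, List.foldl_cons]
  have hbound : ((s :: t).count "x" : Int) + ((if s = "y" then (0:Int)+1 else 0) - 0)
      ≤ (((s :: t).length : Nat) : Int) := by
    by_cases hy : s = "y"
    · have hsx : s ≠ "x" := by rw [hy]; decide
      rw [List.count_cons_of_ne (by simpa using hsx)]
      have := count_x_le t
      simp [hy]
      omega
    · have h1 := count_x_le (s :: t)
      simp only [List.length_cons] at h1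
      push_cast at h1 ⊢
      simp [hy]
      omega
  rw [min_eq_right hbound, foldl_min_map_add]
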